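-- pv_equiv track=rewrite | github.com/fabiomascarenhas/fabiomascarenhas.github.com | python/p2.py | somapoli3
-- ===== SOURCE A (Python) =====
-- def somapoli3(l):
--     res = []
--     for poli in l:
--         if len(poli) > len(res):
--             for _ in range(len(poli) - len(res)):
--                 list.insert(res, 0, 0)
--         for i in range(len(poli)):
--             ir = i + len(res) - len(poli)
--             res[ir] = res[ir] + poli[i]
--     return res
-- ===== SOURCE B (Python) =====
-- def somapoli3(l):
--     n = max((len(p) for p in l), default=0)
--     return [sum(p[len(p) - n + i] for p in l if len(p) - n + i >= 0)
--             for i in range(n)]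
-- ===== Notes on version B (the rewrite author's own statement) =====
-- stated objective: simpler
-- what changed: Replaces the mutable accumulator with front-padding and in-place index updates by a column-wise comprehension: compute the max degree once and sum each right-aligned column directly.
import Mathlib
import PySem

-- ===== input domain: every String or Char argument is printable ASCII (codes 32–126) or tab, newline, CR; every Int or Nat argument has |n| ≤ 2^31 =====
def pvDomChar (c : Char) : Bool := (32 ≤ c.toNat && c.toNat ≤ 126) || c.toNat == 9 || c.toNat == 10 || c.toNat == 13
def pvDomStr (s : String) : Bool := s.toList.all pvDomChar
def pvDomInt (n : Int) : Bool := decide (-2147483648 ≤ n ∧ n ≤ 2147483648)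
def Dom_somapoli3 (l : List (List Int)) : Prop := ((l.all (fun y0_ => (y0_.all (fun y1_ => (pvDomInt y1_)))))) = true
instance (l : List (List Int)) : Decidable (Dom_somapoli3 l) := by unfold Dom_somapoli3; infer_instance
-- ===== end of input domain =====

-- B replaces A's growing accumulator (front padding + in-place index updates) by a
-- column-wise comprehension over right-aligned positions; same return value (objective: simpler).

-- ===== PORT A =====
-- loop body of A's outer 'for poli in l' loop, transliterated step for step
def somapoli3Step (res poli : List Int) : List Int :=
  let res1 :=
    if poli.length > res.length then
      (List.range (poli.length - res.length)).foldl (fun r _ => (0 : Int) :: r) res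
    else res
  (List.range poli.length).foldl
    (fun r i =>
      r.set (i + r.length - poli.length)
        (r.getD (i + r.length - poli.length) 0 + poli.getD i 0)) res1

def somapoli3 (l : List (List Int)) : List Int :=
  l.foldl somapoli3Step []

-- ===== PORT B =====
def somapoli3_alt (l : List (List Int)) : List Int :=
  let n : Nat := (l.map List.length).foldl max 0
  (List.range n).map (fun (i : Nat) =>
    l.foldl (fun s p =>
      if 0 ≤ (p.length : Int) - (n : Int) + (i : Int) then
        s + (PySem.List.pyGet? p ((p.length : Int) - (n : Int) + (i : Int))).getD 0
      else s) 0)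

-- ===== PRECONDITION & SPEC =====
def Spec_somapoli3 (l : List (List Int)) (out : List Int) : Prop := out = somapoli3_alt l
instance (l : List (List Int)) (out : List Int) : Decidable (Spec_somapoli3 l out) := by unfold Spec_somapoli3; infer_instance

-- ===== CLAIM (what is proved, stated in full; the proofs are below) =====
def Claim_equal_somapoli3 : Prop := ∀ (l : List (List Int)), Dom_somapoli3 l → Spec_somapoli3 l (somapoli3 l)

-- ===== LEMMAS AND PROOFS =====

-- value of xs at distance k from the END (0 beyond the length)
def eget (xs : List Int) (k : Nat) : Int := xs.reverse.getD k 0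

-- sum of the k-th-from-the-end coefficients of all polynomials
def col (l : List (List Int)) (k : Nat) : Int := (l.map (fun p => eget p k)).sum

-- A's padded accumulator before the inner update loop
def egpad (res p : List Int) : List Int :=
  if p.length > res.length then List.replicate (p.length - res.length) 0 ++ res else res

lemma eget_of_lt (xs : List Int) (k : Nat) (h : k < xs.length) :
    eget xs k = xs[xs.length - 1 - k] := by
  unfold eget
  rw [List.getD_eq_getElem?_getD, List.getElem?_eq_getElem (by simpa using h)]
  simp [List.getElem_reverse]

lemma eget_of_ge (xs : List Int) (k : Nat) (h : xs.length ≤ k) : eget xs k = 0 := by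
  unfold eget
  rw [List.getD_eq_getElem?_getD, List.getElem?_eq_none (by simpa using h)]
  rfl

lemma getElem_eq_eget (xs : List Int) (i : Nat) (h : i < xs.length) :
    xs[i] = eget xs (xs.length - 1 - i) := by
  rw [eget_of_lt _ _ (by omega)]
  congr 1
  omega

lemma pad_fold (n : Nat) (r : List Int) :
    (List.range n).foldl (fun r _ => (0 : Int) :: r) r = List.replicate n 0 ++ r := by
  induction n with
  | zero => simp
  | succ n ih => simp [List.range_succ, List.foldl_append, ih, List.replicate_succ]

lemma egpad_len (res p : List Int) : (egpad res p).length = max res.length p.length := by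
  unfold egpad
  split <;> simp <;> omega

lemma p_le_egpad (res p : List Int) : p.length ≤ (egpad res p).length := by
  rw [egpad_len]; omega

lemma eget_egpad (res p : List Int) (k : Nat) : eget (egpad res p) k = eget res k := by
  unfold egpad
  split
  · rcases Nat.lt_or_ge k res.length with h | h
    · rw [eget_of_lt _ _ h, eget_of_lt _ _ (by simp; omega)]
      rw [List.getElem_append_right (by simp; omega)]
      simp only [List.length_replicate, List.length_append]
      congr 1
      omega
    · rw [eget_of_ge _ _ h]
      rcases Nat.lt_or_ge k (List.replicate (p.length - res.length) (0:Int) ++ res).length with h2 | h2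
      · rw [eget_of_lt _ _ h2]
        rw [List.getElem_append_left (by simp at h2 ⊢; omega)]
        simp
      · rw [eget_of_ge _ _ h2]
  · rfl

lemma foldl_inv_congr {α β : Type} (P : β → Prop) (f g : β → α → β) (l : List α) (b : β)
    (hb : P b) (hpres : ∀ b a, P b → P (f b a)) (heq : ∀ b a, P b → f b a = g b a) :
    l.foldl f b = l.foldl g b := by
  induction l generalizing b with
  | nil => rfl
  | cons a t ih =>
    simp only [List.foldl_cons]
    rw [← heq b a hb]
    exact ih (f b a) (hpres b a hb)

lemma setfold (p : List Int) : ∀ (r0 : List Int) (d : Nat), r0.length = d + p.length →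
    (List.range p.length).foldl
      (fun r i => r.set (i + d) (r.getD (i + d) 0 + p.getD i 0)) r0
    = r0.take d ++ List.zipWith (· + ·) (r0.drop d) p := by
  induction p with
  | nil =>
    intro r0 d h
    simp only [List.length_nil, Nat.add_zero] at h
    simp [List.take_of_length_le (show r0.length ≤ d by omega)]
  | cons a q ih =>
    intro r0 d h
    simp only [List.length_cons] at h
    have hd : d < r0.length := by omega
    rw [List.length_cons, List.range_succ_eq_map, List.foldl_cons, List.foldl_map]
    have e1 : r0.set (0 + d) (r0.getD (0 + d) 0 + (a :: q).getD 0 0)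
        = r0.set d (r0[d] + a) := by
      simp [List.getD_eq_getElem?_getD, List.getElem?_eq_getElem hd]
    have e2 : (fun (r : List Int) (i : Nat) =>
          r.set (i.succ + d) (r.getD (i.succ + d) 0 + (a :: q).getD i.succ 0))
        = (fun (r : List Int) (i : Nat) =>
          r.set (i + (d + 1)) (r.getD (i + (d + 1)) 0 + q.getD i 0)) := by
      funext r i
      simp [show i.succ + d = i + (d + 1) by omega]
    have e3 : (r0.set d (r0[d] + a)).take (d + 1) = r0.take d ++ [r0[d] + a] := by
      rw [List.take_set, List.take_succ, List.getElem?_eq_getElem hd,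
        List.set_append_right _ _ (by simp only [List.length_take]; omega)]
      simp [List.length_take, Nat.min_eq_left (Nat.le_of_lt hd)]
    rw [e1, e2, ih (r0.set d (r0[d] + a)) (d + 1) (by simp; omega)]
    rw [List.drop_set_of_lt (by omega : d < d + 1), e3,
      List.drop_eq_getElem_cons hd, List.zipWith_cons_cons]
    simp

lemma setfold_body (p r0 : List Int) (hle : p.length ≤ r0.length) :
    (List.range p.length).foldl
      (fun r i =>
        r.set (i + r.length - p.length)
          (r.getD (i + r.length - p.length) 0 + p.getD i 0)) r0
    = r0.take (r0.length - p.length) ++ List.zipWith (· + ·) (r0.drop (r0.length - p.length)) p := by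
  rw [foldl_inv_congr (fun r => r.length = r0.length)
      _ (fun r i => r.set (i + (r0.length - p.length))
          (r.getD (i + (r0.length - p.length)) 0 + p.getD i 0)) _ r0 rfl
      (by intro b i hb; simpa using hb)
      (by
        intro b i hb
        have e : i + b.length - p.length = i + (r0.length - p.length) := by omega
        rw [e])]
  exact setfold p r0 (r0.length - p.length) (by omega)

lemma step_closed (res p : List Int) :
    somapoli3Step res p
      = (egpad res p).take ((egpad res p).length - p.length)
        ++ List.zipWith (· + ·) ((egpad res p).drop ((egpad res p).length - p.length)) p := by
  unfold somapoli3Step egpad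
  split
  · rw [pad_fold]
    exact setfold_body p _ (by simp only [List.length_append, List.length_replicate]; omega)
  · exact setfold_body p _ (by omega)

lemma step_len (res p : List Int) :
    (somapoli3Step res p).length = max res.length p.length := by
  rw [step_closed]
  have := p_le_egpad res p
  simp only [List.length_append, List.length_take, List.length_zipWith, List.length_drop]
  rw [egpad_len] at this ⊢
  omega

lemma eget_step (res p : List Int) (k : Nat) :
    eget (somapoli3Step res p) k = eget res k + eget p k := by
  have hpl := egpad_len res p
  have hlen := step_len res p
  rcases Nat.lt_or_ge k (max res.length p.length) with hk2 | hk2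
  · rcases Nat.lt_or_ge k p.length with hk | hk
    · rw [eget_of_lt (somapoli3Step res p) k (by omega), eget_of_lt p k hk,
        ← eget_egpad res p k, eget_of_lt (egpad res p) k (by omega)]
      simp only [hlen]
      simp only [step_closed, hpl]
      rw [List.getElem_append_right (by simp only [List.length_take, hpl]; omega)]
      rw [List.getElem_zipWith, List.getElem_drop]
      simp only [List.length_take, hpl]
      all_goals congr 1
      all_goals congr 1
      all_goals omega
    · rw [eget_of_lt (somapoli3Step res p) k (by omega), eget_of_ge p k hk,
        ← eget_egpad res p k, eget_of_lt (egpad res p) k (by omega)]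
      simp only [hlen]
      simp only [step_closed, hpl]
      rw [List.getElem_append_left (by simp only [List.length_take, hpl]; omega)]
      rw [List.getElem_take, add_zero]
  · rw [eget_of_ge (somapoli3Step res p) k (by omega), eget_of_ge p k (by omega),
      eget_of_ge res k (by omega)]
    simp

lemma A_len : ∀ (l : List (List Int)) (res : List Int),
    (l.foldl somapoli3Step res).length = l.foldl (fun n p => max n p.length) res.length := by
  intro l
  induction l with
  | nil => intro res; rfl
  | cons p t ih =>
    intro res
    simp only [List.foldl_cons]
    rw [ih, step_len]

lemma A_eget : ∀ (l : List (List Int)) (res : List Int) (k : Nat),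
    eget (l.foldl somapoli3Step res) k = eget res k + col l k := by
  intro l
  induction l with
  | nil => intro res k; simp [col]
  | cons p t ih =>
    intro res k
    simp only [List.foldl_cons]
    rw [ih, eget_step]
    simp only [col, List.map_cons, List.sum_cons]
    ring

lemma B_entry (n i : Nat) (hi : i < n) : ∀ (l : List (List Int)) (s : Int),
    l.foldl (fun s p =>
      if 0 ≤ (p.length : Int) - (n : Int) + (i : Int) then
        s + (PySem.List.pyGet? p ((p.length : Int) - (n : Int) + (i : Int))).getD 0
      else s) s = s + col l (n - 1 - i) := by
  intro l
  induction l with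
  | nil => intro s; simp [col]
  | cons p t ih =>
    intro s
    simp only [List.foldl_cons]
    rw [ih]
    have hbody : (if 0 ≤ (p.length : Int) - (n : Int) + (i : Int) then
        s + (PySem.List.pyGet? p ((p.length : Int) - (n : Int) + (i : Int))).getD 0
      else s) = s + eget p (n - 1 - i) := by
      by_cases hc : 0 ≤ (p.length : Int) - (n : Int) + (i : Int)
      · rw [if_pos hc]
        have hlt : n - 1 - i < p.length := by omega
        rw [eget_of_lt _ _ hlt]
        have hidx : (p.length : Int) - (n : Int) + (i : Int)
            = ((p.length - 1 - (n - 1 - i) : Nat) : Int) := by omega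
        rw [hidx, PySem.List.pyGet?_natCast,
          List.getElem?_eq_getElem (by omega)]
        rfl
      · rw [if_neg hc, eget_of_ge _ _ (by omega)]
        simp
    rw [hbody]
    simp only [col, List.map_cons, List.sum_cons]
    ring

-- ===== VERDICT (by name: the statement is the Claim_ definition above) =====
theorem somapoli3_spec : Claim_equal_somapoli3 := by
  intro l _
  unfold Spec_somapoli3 somapoli3 somapoli3_alt
  have hM : (l.foldl somapoli3Step []).length = (l.map List.length).foldl max 0 := by
    rw [A_len, List.foldl_map]; rfl
  apply List.ext_getElem
  · simpa using hM
  · intro i h1 h2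
    simp only [List.length_map, List.length_range] at h2
    simp only [List.getElem_map, List.getElem_range]
    rw [getElem_eq_eget _ _ h1, hM, A_eget,
      B_entry ((l.map List.length).foldl max 0) i h2]
    simp [eget]
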